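-- pv_equiv track=rewrite | github.com/tsunodan6467-jpg/basketball_project | basketball_sim/tests/run_club_history_test.py | _is_deep_international_row
-- ===== SOURCE A (Python) =====
-- from typing import Any, Iterable
--
-- def _safe_text(value: Any) -> str:
--     if value is None:
--         return ""
--     return str(value)
--
-- def _normalized_blob(row: dict) -> str:
--     parts = [
--         _safe_text(row.get("category")),
--         _safe_text(row.get("milestone_type")),
--         _safe_text(row.get("type")),
--         _safe_text(row.get("competition_name")),
--         _safe_text(row.get("title")),
--         _safe_text(row.get("detail")),
--         _safe_text(row.get("note")),
--         _safe_text(row.get("result")),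
--     ]
--     return " | ".join(parts)
--
-- def _is_deep_international_row(row: dict) -> bool:
--     blob = _normalized_blob(row)
--     deep_keywords = [
--         "アジアカップ",
--         "asia cup",
--         "世界一決定戦",
--         "intercontinental",
--         "インターコンチネンタル",
--         "FINAL BOSS",
--         "final boss",
--         "nba dream team",
--         "nbaドリームチーム",
--         "ドリームチーム戦",
--     ]
--     return any(keyword.lower() in blob.lower() for keyword in deep_keywords)
-- ===== SOURCE B (Python) =====
-- # B: searches each of the eight fields separately (with early exit) instead of
-- # joining them into one " | " blob and searching that; correct because no
-- # keyword contains "|" or starts/ends with a space, so no match can straddle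
-- # the separator.
--
-- _FIELD_KEYS = ("category", "milestone_type", "type", "competition_name",
--                "title", "detail", "note", "result")
--
-- _KEYWORDS_LOWER = ("アジアカップ", "asia cup", "世界一決定戦", "intercontinental",
--                    "インターコンチネンタル", "final boss", "nba dream team",
--                    "nbaドリームチーム", "ドリームチーム戦")
--
-- def _is_deep_international_row(row):
--     for key in _FIELD_KEYS:
--         value = row.get(key)
--         if value is None:
--             continue
--         text = str(value).lower()
--         if any(k in text for k in _KEYWORDS_LOWER):
--             return True
--     return False
-- ===== Notes on version B (the rewrite author's own statement) =====
-- stated objective: simpler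
-- what changed: A joins the eight fields into one ' | '-separated blob and runs every keyword through the whole blob; B never builds the blob: it walks the fields one by one, lowercases each field on its own and returns True at the first field containing a keyword (sound because no keyword contains '|' or a leading/trailing space, so no match can straddle the separator).
import Mathlib
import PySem

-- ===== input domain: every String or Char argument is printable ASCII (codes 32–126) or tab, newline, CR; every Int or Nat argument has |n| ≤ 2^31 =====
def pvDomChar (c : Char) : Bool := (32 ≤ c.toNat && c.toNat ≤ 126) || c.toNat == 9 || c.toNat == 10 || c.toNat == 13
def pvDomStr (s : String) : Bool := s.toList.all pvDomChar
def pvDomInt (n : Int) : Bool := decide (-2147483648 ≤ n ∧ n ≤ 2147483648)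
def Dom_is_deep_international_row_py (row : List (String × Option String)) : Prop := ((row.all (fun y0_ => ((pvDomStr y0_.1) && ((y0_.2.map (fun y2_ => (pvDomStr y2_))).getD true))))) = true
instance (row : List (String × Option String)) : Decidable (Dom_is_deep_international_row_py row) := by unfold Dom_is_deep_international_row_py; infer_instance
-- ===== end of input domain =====

-- B searches the eight fields one by one with early exit instead of joining them
-- into one " | " blob and searching that (simpler decomposition; sound because no
-- keyword contains '|' or starts/ends with a space).

-- ===== PORT A =====
-- _safe_text(value): "" if value is None else str(value)  (str on a str is the identity)
def pvSafeText (value : Option String) : String :=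
  match value with
  | none => ""
  | some s => s

-- _normalized_blob(row): the eight fields, " | "-joined; row.get(k) = first match or None
def pvBlob (row : List (String × Option String)) : String :=
  PySem.Str.join " | "
    (["category", "milestone_type", "type", "competition_name",
      "title", "detail", "note", "result"].map
      (fun k => pvSafeText ((PySem.Dict.get? (PySem.Dict.ofList row) k).getD none)))

def pvDeepKeywords : List String :=
  ["アジアカップ", "asia cup", "世界一決定戦", "intercontinental",
   "インターコンチネンタル", "FINAL BOSS", "final boss", "nba dream team",
   "nbaドリームチーム", "ドリームチーム戦"]

def is_deep_international_row_py (row : List (String × Option String)) : Bool :=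
  let blob := pvBlob row
  pvDeepKeywords.any (fun keyword =>
    PySem.Str.isIn (PySem.Str.lower keyword) (PySem.Str.lower blob))

-- ===== PORT B =====
-- _FIELD_KEYS and _KEYWORDS_LOWER (B spells the lowered keywords out, dropping the duplicate)
def pvFieldKeys : List String :=
  ["category", "milestone_type", "type", "competition_name",
   "title", "detail", "note", "result"]

def pvKwsLower : List String :=
  ["アジアカップ", "asia cup", "世界一決定戦", "intercontinental",
   "インターコンチネンタル", "final boss", "nba dream team",
   "nbaドリームチーム", "ドリームチーム戦"]

-- the for-loop over _FIELD_KEYS: continue on None, early return on a hit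
def pvLoop (d : PySem.Dict String (Option String)) : List String → Bool
  | [] => false
  | key :: rest =>
    match (PySem.Dict.get? d key).getD none with
    | none => pvLoop d rest
    | some v =>
      if pvKwsLower.any (fun k => PySem.Str.isIn k (PySem.Str.lower v)) then true
      else pvLoop d rest

def is_deep_international_row_py_alt (row : List (String × Option String)) : Bool :=
  pvLoop (PySem.Dict.ofList row) pvFieldKeys

-- ===== PRECONDITION & SPEC =====
def Spec_is_deep_international_row_py (row : List (String × Option String)) (out : Bool) : Prop := out = is_deep_international_row_py_alt row
instance (row : List (String × Option String)) (out : Bool) : Decidable (Spec_is_deep_international_row_py row out) := by unfold Spec_is_deep_international_row_py; infer_instance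

-- ===== CLAIM (what is proved, stated in full; the proofs are below) =====
def Claim_equal_is_deep_international_row_py : Prop := ∀ (row : List (String × Option String)), Dom_is_deep_international_row_py row → Spec_is_deep_international_row_py row (is_deep_international_row_py row)

-- ===== LEMMAS AND PROOFS =====

-- a prefix of a ++ x :: b that avoids x is a prefix of a
theorem pvPrefixSplit {b : List Char} {x : Char} :
    ∀ (k a : List Char), k <+: a ++ x :: b → x ∉ k → k <+: a := by
  intro k
  induction k with
  | nil => intro a _ _; exact List.nil_prefix
  | cons y k' ih =>
    intro a hp hx
    cases a with
    | nil =>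
      rcases List.cons_prefix_cons.mp hp with ⟨rfl, _⟩
      exact absurd List.mem_cons_self hx
    | cons c a' =>
      rcases List.cons_prefix_cons.mp hp with ⟨rfl, hp'⟩
      exact List.cons_prefix_cons.mpr ⟨rfl, ih a' hp' (fun h => hx (List.mem_cons_of_mem _ h))⟩

-- an infix of a ++ x :: b that avoids x is an infix of a or of b
theorem pvInfixSplit {k b : List Char} {x : Char} :
    ∀ a : List Char, k <:+: a ++ x :: b → x ∉ k → k <:+: a ∨ k <:+: b := by
  intro a
  induction a with
  | nil =>
    intro h hx
    rcases List.infix_cons_iff.mp h with hp | hi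
    · cases k with
      | nil => exact Or.inl List.nil_infix
      | cons y k' =>
        rcases List.cons_prefix_cons.mp hp with ⟨rfl, _⟩
        exact absurd List.mem_cons_self hx
    · exact Or.inr hi
  | cons c a' ih =>
    intro h hx
    rcases List.infix_cons_iff.mp h with hp | hi
    · exact Or.inl (pvPrefixSplit k (c :: a') hp hx).isInfix
    · rcases ih hi hx with h1 | h2
      · exact Or.inl (List.infix_cons h1)
      · exact Or.inr h2

-- an infix of c :: b that does not start with c is an infix of b
theorem pvInfixBehead {k b : List Char} {c : Char}
    (h : k <:+: c :: b) (hc : k.head? ≠ some c) : k <:+: b := by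
  rcases List.infix_cons_iff.mp h with hp | hi
  · cases k with
    | nil => exact List.nil_infix
    | cons y k' =>
      rcases List.cons_prefix_cons.mp hp with ⟨rfl, _⟩
      exact absurd rfl hc
  · exact hi

-- an infix of a ++ [c] that does not end with c is an infix of a
theorem pvInfixDetail {k a : List Char} {c : Char}
    (h : k <:+: a ++ [c]) (hc : k.getLast? ≠ some c) : k <:+: a := by
  have hr : k.reverse <:+: c :: a.reverse := by
    have := List.reverse_infix.mpr h
    simpa using this
  have h2 := pvInfixBehead hr (by simpa using hc)
  have := List.reverse_infix.mpr h2
  simpa using this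

-- one separator step: an occurrence in u ++ " | " ++ r is in u or in r
theorem pvSepStep (k u r : List Char) (hbar : ('|' : Char) ∉ k)
    (hh : k.head? ≠ some ' ') (hl : k.getLast? ≠ some ' ') :
    (k <:+: u ++ (' ' :: '|' :: ' ' :: r)) ↔ (k <:+: u ∨ k <:+: r) := by
  constructor
  · intro h
    have h' : k <:+: (u ++ [' ']) ++ '|' :: (' ' :: r) := by simpa using h
    rcases pvInfixSplit (u ++ [' ']) h' hbar with h1 | h2
    · exact Or.inl (pvInfixDetail h1 hl)
    · exact Or.inr (pvInfixBehead h2 hh)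
  · rintro (h1 | h2)
    · exact h1.trans ⟨[], ' ' :: '|' :: ' ' :: r, by simp⟩
    · exact h2.trans ⟨u ++ [' ', '|', ' '], [], by simp⟩

-- searching the " | "-joined parts = searching each part (keyword avoids the separator)
theorem pvJoinSearch (k : List Char) (hbar : ('|' : Char) ∉ k)
    (hh : k.head? ≠ some ' ') (hl : k.getLast? ≠ some ' ') :
    ∀ (p : List Char) (ps : List (List Char)),
      PySem.Chars.isIn k (PySem.Chars.join [' ', '|', ' '] (p :: ps))
        = (p :: ps).any (fun q => PySem.Chars.isIn k q) := by
  intro p ps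
  induction ps generalizing p with
  | nil => simp [PySem.Chars.join_singleton]
  | cons q rest ih =>
    rw [PySem.Chars.join_cons_cons]
    apply Bool.eq_iff_iff.mpr
    rw [List.any_cons]
    simp only [Bool.or_eq_true, PySem.Chars.isIn_iff_infix]
    rw [show p ++ [' ', '|', ' '] ++ PySem.Chars.join [' ', '|', ' '] (q :: rest)
          = p ++ (' ' :: '|' :: ' ' :: PySem.Chars.join [' ', '|', ' '] (q :: rest)) by simp]
    rw [pvSepStep k p _ hbar hh hl]
    have hrest := Bool.eq_iff_iff.mp (ih q)
    simp only [PySem.Chars.isIn_iff_infix, List.any_eq_true] at hrest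
    rw [hrest]
    simp [PySem.Chars.isIn_iff_infix]

-- lower distributes over join
theorem pvLowerJoin (sep : List Char) (ps : List (List Char)) :
    PySem.Chars.lower (PySem.Chars.join sep ps)
      = PySem.Chars.join (PySem.Chars.lower sep) (ps.map PySem.Chars.lower) := by
  induction ps with
  | nil => rfl
  | cons p rest ih =>
    cases rest with
    | nil => simp [PySem.Chars.join_singleton]
    | cons q rest' =>
      simp only [List.map_cons] at ih ⊢
      rw [PySem.Chars.join_cons_cons, PySem.Chars.join_cons_cons, ← ih]
      simp [PySem.Chars.lower]

-- B's per-field test, as a function of the looked-up value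
def pvFieldHit (v : Option String) : Bool :=
  match v with
  | none => false
  | some s => pvKwsLower.any (fun k => PySem.Str.isIn k (PySem.Str.lower s))

-- B's early-return loop is an any over the field keys
theorem pvLoopEqAny (d : PySem.Dict String (Option String)) :
    ∀ keys : List String,
      pvLoop d keys = keys.any (fun key => pvFieldHit ((PySem.Dict.get? d key).getD none)) := by
  intro keys
  induction keys with
  | nil => rfl
  | cons key rest ih =>
    rw [List.any_cons]
    cases hv : (PySem.Dict.get? d key).getD none with
    | none =>
      rw [show pvLoop d (key :: rest)
            = (match (PySem.Dict.get? d key).getD none with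
               | none => pvLoop d rest
               | some v => if pvKwsLower.any (fun k => PySem.Str.isIn k (PySem.Str.lower v)) then true
                           else pvLoop d rest) from rfl, hv, ih]
      rfl
    | some v =>
      rw [show pvLoop d (key :: rest)
            = (match (PySem.Dict.get? d key).getD none with
               | none => pvLoop d rest
               | some v => if pvKwsLower.any (fun k => PySem.Str.isIn k (PySem.Str.lower v)) then true
                           else pvLoop d rest) from rfl, hv, ih,
          show pvFieldHit (some v) = pvKwsLower.any (fun k => PySem.Str.isIn k (PySem.Str.lower v)) from rfl]
      show (if pvKwsLower.any (fun k => PySem.Str.isIn k (PySem.Str.lower v)) then true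
            else rest.any fun key => pvFieldHit ((PySem.Dict.get? d key).getD none))
          = ((pvKwsLower.any fun k => PySem.Str.isIn k (PySem.Str.lower v)) ||
             rest.any fun key => pvFieldHit ((PySem.Dict.get? d key).getD none))
      cases pvKwsLower.any (fun k => PySem.Str.isIn k (PySem.Str.lower v)) <;> rfl

-- the lowered field texts A's blob is joined from
def pvTexts (row : List (String × Option String)) : List (List Char) :=
  pvFieldKeys.map (fun key =>
    PySem.Chars.lower (pvSafeText ((PySem.Dict.get? (PySem.Dict.ofList row) key).getD none)).toList)

-- every lowered keyword avoids '|' and does not start or end with a space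
theorem pvKwClean : ∀ k ∈ pvKwsLower,
    ('|' : Char) ∉ k.toList ∧ k.toList.head? ≠ some ' ' ∧ k.toList.getLast? ≠ some ' ' := by
  decide

-- the lowered blob is the " | "-join of the lowered field texts
theorem pvLowerBlob (row : List (String × Option String)) :
    (PySem.Str.lower (pvBlob row)).toList
      = PySem.Chars.join [' ', '|', ' '] (pvTexts row) := by
  rw [PySem.Str.toList_lower]
  unfold pvBlob
  rw [PySem.Str.toList_join, pvLowerJoin]
  rw [show PySem.Chars.lower (" | ".toList) = [' ', '|', ' '] from by decide]
  simp [pvTexts, pvFieldKeys]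

-- A's search of the blob for one keyword = a search of each field text
theorem pvPerKeyword (row : List (String × Option String)) (k : String) (hk : k ∈ pvKwsLower) :
    PySem.Str.isIn k (PySem.Str.lower (pvBlob row))
      = (pvTexts row).any (fun t => PySem.Chars.isIn k.toList t) := by
  obtain ⟨hbar, hh, hl⟩ := pvKwClean k hk
  obtain ⟨p, ps, hpps⟩ : ∃ p ps, pvTexts row = p :: ps := ⟨_, _, rfl⟩
  rw [show PySem.Str.isIn k (PySem.Str.lower (pvBlob row))
        = PySem.Chars.isIn k.toList (PySem.Str.lower (pvBlob row)).toList from rfl]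
  rw [pvLowerBlob, hpps, pvJoinSearch k.toList hbar hh hl p ps]

-- swap a double any
theorem pvAnySwap {α β : Type} (xs : List α) (ys : List β) (g : α → β → Bool) :
    xs.any (fun x => ys.any (fun y => g x y)) = ys.any (fun y => xs.any (fun x => g x y)) := by
  apply Bool.eq_iff_iff.mpr
  simp only [List.any_eq_true]
  tauto

-- A, reduced to the nine distinct lowered keywords
theorem pvA9 (row : List (String × Option String)) :
    is_deep_international_row_py row
      = pvKwsLower.any (fun k => PySem.Str.isIn k (PySem.Str.lower (pvBlob row))) := by
  unfold is_deep_international_row_py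
  simp only [pvDeepKeywords, pvKwsLower, List.any_cons, List.any_nil]
  rw [show PySem.Str.lower "アジアカップ" = "アジアカップ" from rfl,
      show PySem.Str.lower "asia cup" = "asia cup" from rfl,
      show PySem.Str.lower "世界一決定戦" = "世界一決定戦" from rfl,
      show PySem.Str.lower "intercontinental" = "intercontinental" from rfl,
      show PySem.Str.lower "インターコンチネンタル" = "インターコンチネンタル" from rfl,
      show PySem.Str.lower "FINAL BOSS" = "final boss" from rfl,
      show PySem.Str.lower "final boss" = "final boss" from rfl,
      show PySem.Str.lower "nba dream team" = "nba dream team" from rfl,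
      show PySem.Str.lower "nbaドリームチーム" = "nbaドリームチーム" from rfl,
      show PySem.Str.lower "ドリームチーム戦" = "ドリームチーム戦" from rfl]
  cases PySem.Str.isIn "final boss" (PySem.Str.lower (pvBlob row)) <;> simp

-- ===== VERDICT (by name: the statement is the Claim_ definition above) =====
theorem is_deep_international_row_py_spec : Claim_equal_is_deep_international_row_py := by
  intro row _
  unfold Spec_is_deep_international_row_py is_deep_international_row_py_alt
  rw [pvA9, pvLoopEqAny]
  rw [PySem.List.any_congr_mem (fun k hk => pvPerKeyword row k hk)]
  simp only [pvTexts, List.any_map, Function.comp_def]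
  rw [pvAnySwap]
  apply PySem.List.any_congr_mem
  intro key _
  cases hv : (PySem.Dict.get? (PySem.Dict.ofList row) key).getD none with
  | none => decide
  | some v =>
    simp only [pvSafeText, pvFieldHit]
    apply PySem.List.any_congr_mem
    intro k _
    rw [show PySem.Str.isIn k (PySem.Str.lower v)
          = PySem.Chars.isIn k.toList (PySem.Str.lower v).toList from rfl,
        PySem.Str.toList_lower]
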